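-- pv_equiv track=rewrite | github.com/elekto-io/elekto | elekto/core/__init__.py | schulze_d
-- ===== SOURCE A (Python) =====
-- def schulze_d(candidates, ballots):
--     d = {(V, W): 0 for V in candidates for W in candidates if V != W}
--     for voter in ballots.keys():
--         for V, Vr in ballots[voter]:
--             for W, Wr in ballots[voter]:
--                 if V != W:
--                     d[(V, W)] += 1 if Vr > Wr else 0
--
--     return d
-- ===== SOURCE B (Python) =====
-- def schulze_d(candidates, ballots):
--     # rank-sorted sweep per ballot: group equal ranks; every candidate increments
--     # d[(V, W)] once for each earlier-seen W of strictly smaller rank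
--     d = {(V, W): 0 for V in candidates for W in candidates if V != W}
--     for entries in ballots.values():
--         seen = []     # names with rank strictly below the current tier
--         group = []    # names in the current (equal-rank) tier
--         cur = None
--         for name, rank in sorted(entries, key=lambda e: e[1]):
--             if group and rank != cur:
--                 seen = seen + group
--                 group = []
--             for W in seen:
--                 if name != W:
--                     d[(name, W)] += 1
--             group.append(name)
--             cur = rank
--     return d
-- ===== Notes on version B (the rewrite author's own statement) =====
-- stated objective: alternative
-- what changed: Instead of scanning all ordered pairs of each ballot's entries, B sorts each ballot by rank and sweeps it, grouping equal-rank tiers and incrementing d[(V,W)] only for earlier-seen W of strictly smaller rank, so tied and reversed pairs are never touched.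
-- crash fix: On ballots that name a candidate outside `candidates` only in rank-tied pairs, A raises KeyError (it indexes d even when it adds 0) while B returns the preference-count matrix. — e.g. on schulze_d(["a"], [("v", [("a", 0), ("b", 0)])]): A raises KeyError, B returns []
import Mathlib
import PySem

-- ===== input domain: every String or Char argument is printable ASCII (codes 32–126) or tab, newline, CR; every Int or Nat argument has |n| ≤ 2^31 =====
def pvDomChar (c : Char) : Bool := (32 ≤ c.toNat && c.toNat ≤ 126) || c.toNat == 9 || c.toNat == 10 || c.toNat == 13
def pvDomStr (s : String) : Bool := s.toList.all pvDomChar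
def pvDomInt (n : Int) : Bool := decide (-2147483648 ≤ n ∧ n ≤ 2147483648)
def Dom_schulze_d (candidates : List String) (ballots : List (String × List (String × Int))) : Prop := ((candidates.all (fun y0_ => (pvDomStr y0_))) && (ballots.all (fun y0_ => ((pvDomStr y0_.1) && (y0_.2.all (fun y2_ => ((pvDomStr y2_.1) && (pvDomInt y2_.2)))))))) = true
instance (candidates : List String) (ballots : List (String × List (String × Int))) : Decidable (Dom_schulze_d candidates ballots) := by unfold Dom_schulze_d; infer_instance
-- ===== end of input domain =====

-- B replaces A's all-ordered-pairs scan of each ballot by a grouped sweep over the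
-- rank-sorted ballot (equal-rank tiers never count against each other).

-- ===== PORT A =====
-- shared first line of both Pythons: d = {(V, W): 0 for V in candidates for W in candidates if V != W}
def pvZeroDict (candidates : List String) : PySem.Dict (String × String) Int :=
  candidates.foldl (fun d V =>
    candidates.foldl (fun d W => if V ≠ W then d.insert (V, W) 0 else d) d)
    PySem.Dict.empty

def schulze_d (candidates : List String) (ballots : List (String × List (String × Int))) : List (String × String × Int) :=
  let bd := PySem.Dict.ofList ballots
  let d := bd.keys.foldl (fun d voter =>
    (bd.getD voter []).foldl (fun d x =>
      (bd.getD voter []).foldl (fun d y =>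
        if x.1 ≠ y.1 then d.modify (x.1, y.1) 0 (· + (if x.2 > y.2 then 1 else 0)) else d)
        d)
      d)
    (pvZeroDict candidates)
  d.items.map (fun p => (p.1.1, p.1.2, p.2))

-- ===== PORT B =====
def schulze_d_alt (candidates : List String) (ballots : List (String × List (String × Int))) : List (String × String × Int) :=
  let d := (PySem.Dict.ofList ballots).values.foldl (fun d entries =>
    ((PySem.List.sorted entries (fun e => e.2) false).foldl
      (fun (st : PySem.Dict (String × String) Int × List String × List String × Option Int) e =>
        let fl := if st.2.2.1 ≠ [] ∧ some e.2 ≠ st.2.2.2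
                  then (st.2.1 ++ st.2.2.1, ([] : List String))
                  else (st.2.1, st.2.2.1)
        let d' := fl.1.foldl (fun d W => if e.1 ≠ W then d.modify (e.1, W) 0 (· + 1) else d) st.1
        (d', fl.1, fl.2 ++ [e.1], some e.2))
      (d, [], [], none)).1)
    (pvZeroDict candidates)
  d.items.map (fun p => (p.1.1, p.1.2, p.2))

-- ===== PRECONDITION & SPEC =====
-- Pre_ excludes exactly the inputs where A raises KeyError: some ballot contains two
-- entries with distinct candidate names of which one is not in `candidates`.
def Pre_schulze_d (candidates : List String) (ballots : List (String × List (String × Int))) : Prop :=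
  ∀ p ∈ ballots, ∀ x ∈ p.2, ∀ y ∈ p.2, x.1 ≠ y.1 → x.1 ∈ candidates ∧ y.1 ∈ candidates
instance (candidates : List String) (ballots : List (String × List (String × Int))) : Decidable (Pre_schulze_d candidates ballots) := by unfold Pre_schulze_d; infer_instance

def pvWitness_schulze_d : List String × (List (String × List (String × Int))) :=
  (["a", "b"], [("v1", [("a", 1), ("b", 2)]), ("v2", [("b", 1), ("a", 1)])])

-- A raises KeyError whenever some ballot has a distinct-name pair with an unknown name, while B
-- returns the preference matrix when every such unknown name occurs only in rank-tied pairs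
-- (B never indexes d for a tied pair).
def Raises_schulze_d (candidates : List String) (ballots : List (String × List (String × Int))) : Prop :=
  (∃ p ∈ ballots, ∃ x ∈ p.2, ∃ y ∈ p.2, x.1 ≠ y.1 ∧ (x.1 ∉ candidates ∨ y.1 ∉ candidates)) ∧
  (∀ p ∈ ballots, ∀ x ∈ p.2, ∀ y ∈ p.2, x.1 ≠ y.1 → y.2 < x.2 → x.1 ∈ candidates ∧ y.1 ∈ candidates)
instance (candidates : List String) (ballots : List (String × List (String × Int))) : Decidable (Raises_schulze_d candidates ballots) := by unfold Raises_schulze_d; infer_instance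

def pvRaiseWitness_schulze_d : List String × (List (String × List (String × Int))) :=
  (["a"], [("v", [("a", 0), ("b", 0)])])
def pvRaiseWitnessOut_schulze_d : List (String × String × Int) := []

def Spec_schulze_d (candidates : List String) (ballots : List (String × List (String × Int))) (out : List (String × String × Int)) : Prop := out = schulze_d_alt candidates ballots
instance (candidates : List String) (ballots : List (String × List (String × Int))) (out : List (String × String × Int)) : Decidable (Spec_schulze_d candidates ballots out) := by unfold Spec_schulze_d; infer_instance

-- ===== CLAIM (what is proved, stated in full; the proofs are below) =====
def Claim_equal_schulze_d : Prop := ∀ (candidates : List String) (ballots : List (String × List (String × Int))), Dom_schulze_d candidates ballots → Pre_schulze_d candidates ballots → Spec_schulze_d candidates ballots (schulze_d candidates ballots)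

def Claim_raises_schulze_d : Prop := (∀ (candidates : List String) (ballots : List (String × List (String × Int))), Dom_schulze_d candidates ballots → Raises_schulze_d candidates ballots → ¬ Pre_schulze_d candidates ballots) ∧ (Dom_schulze_d (pvRaiseWitness_schulze_d.1) (pvRaiseWitness_schulze_d.2) ∧ Raises_schulze_d (pvRaiseWitness_schulze_d.1) (pvRaiseWitness_schulze_d.2) ∧ schulze_d_alt (pvRaiseWitness_schulze_d.1) (pvRaiseWitness_schulze_d.2) = pvRaiseWitnessOut_schulze_d)

-- ===== LEMMAS AND PROOFS =====

-- contribution of the ordered pair (x, y) to key k: 1 iff names distinct, the pair is k,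
-- and x is ranked strictly above (larger than) y
def pvRow (x y : String × Int) (k : String × String) : Int :=
  if x.1 ≠ y.1 ∧ (x.1, y.1) = k then (if x.2 > y.2 then 1 else 0) else 0

def pvCnt (u : List (String × Int)) (x : String × Int) (k : String × String) : Int :=
  (u.map (fun y => pvRow x y k)).sum

-- one ballot's total contribution to key k (A's double loop, read order-free)
def pvPairCnt (l : List (String × Int)) (k : String × String) : Int :=
  (l.map (fun x => pvCnt l x k)).sum

-- what the sweep still adds for `rest` after the prefix u has been processed
def pvPairsAdd (u rest : List (String × Int)) (k : String × String) : Int :=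
  match rest with
  | [] => 0
  | e :: t => pvCnt u e k + pvPairsAdd (u ++ [e]) t k

-- B's sweep state transformer (definitionally the lambda inside schulze_d_alt)
def pvStep (st : PySem.Dict (String × String) Int × List String × List String × Option Int)
    (e : String × Int) : PySem.Dict (String × String) Int × List String × List String × Option Int :=
  let fl := if st.2.2.1 ≠ [] ∧ some e.2 ≠ st.2.2.2
            then (st.2.1 ++ st.2.2.1, ([] : List String))
            else (st.2.1, st.2.2.1)
  let d' := fl.1.foldl (fun d W => if e.1 ≠ W then d.modify (e.1, W) 0 (· + 1) else d) st.1
  (d', fl.1, fl.2 ++ [e.1], some e.2)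

-- generic conditional-modify loop: its effect on getD …
theorem pv_getD_foldl_cmod {α : Type} (l : List α) (key : α → String × String)
    (c : α → Prop) [DecidablePred c] (amt : α → Int)
    (d : PySem.Dict (String × String) Int) (k : String × String) :
    ((l.foldl (fun d a => if c a then d.modify (key a) 0 (· + amt a) else d) d).getD k 0)
      = d.getD k 0 + (l.map (fun a => if c a ∧ key a = k then amt a else 0)).sum := by
  induction l generalizing d with
  | nil => simp
  | cons a t ih =>
    simp only [List.foldl_cons, List.map_cons, List.sum_cons, ih]
    by_cases hc : c a
    · simp only [if_pos hc, PySem.Dict.getD_modify]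
      by_cases hk : key a = k
      · subst hk; simp [hc]; ring
      · rw [if_neg (fun h => hk h.symm)]
        simp [hc, hk]
    · simp [hc]

-- … and on the key list, when every touched key is already present
theorem pv_keys_foldl_cmod {α : Type} (l : List α) (key : α → String × String)
    (c : α → Prop) [DecidablePred c] (amt : α → Int)
    (d : PySem.Dict (String × String) Int)
    (h : ∀ a ∈ l, c a → key a ∈ d.keys) :
    (l.foldl (fun d a => if c a then d.modify (key a) 0 (· + amt a) else d) d).keys = d.keys := by
  induction l generalizing d with
  | nil => rfl
  | cons a t ih =>
    simp only [List.foldl_cons]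
    by_cases hc : c a
    · rw [if_pos hc]
      have hk : (d.modify (key a) 0 (· + amt a)).keys = d.keys := by
        rw [PySem.Dict.keys_modify,
          PySem.Dict.keys_insert_of_contains _ _ ((PySem.Dict.contains_iff_mem_keys _ _).2 (h a (by simp) hc))]
      rw [ih _ (fun b hb hcb => by rw [hk]; exact h b (by simp [hb]) hcb), hk]
    · rw [if_neg hc]; exact ih _ (fun b hb hcb => h b (by simp [hb]) hcb)

theorem pv_mem_keys_zinner (cs : List String) (V : String) (d : PySem.Dict (String × String) Int) (k : String × String) :
    k ∈ (cs.foldl (fun d W => if V ≠ W then d.insert (V, W) 0 else d) d).keys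
      ↔ k ∈ d.keys ∨ (k.1 = V ∧ k.2 ∈ cs ∧ k.1 ≠ k.2) := by
  induction cs generalizing d with
  | nil => simp
  | cons W t ih =>
    simp only [List.foldl_cons, ih]
    by_cases h : V = W
    · subst h; simp only [ne_eq, not_true_eq_false, if_false]
      constructor
      · rintro (h | h); · exact Or.inl h
        · exact Or.inr ⟨h.1, by simp [h.2.1], h.2.2⟩
      · rintro (h | ⟨h1, h2, h3⟩); · exact Or.inl h
        · rcases List.mem_cons.1 h2 with h2 | h2
          · exact absurd (h1.trans h2.symm) h3
          · exact Or.inr ⟨h1, h2, h3⟩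
    · rw [if_pos h]
      constructor
      · rintro (hm | hrest)
        · rcases (PySem.Dict.mem_keys_insert _ _ _ _).1 hm with he | hd
          · exact Or.inr ⟨by simp [he], by simp [he], by simp [he]; exact h⟩
          · exact Or.inl hd
        · exact Or.inr ⟨hrest.1, by simp [hrest.2.1], hrest.2.2⟩
      · rintro (hd | ⟨h1, h2, h3⟩)
        · exact Or.inl ((PySem.Dict.mem_keys_insert _ _ _ _).2 (Or.inr hd))
        · rcases List.mem_cons.1 h2 with h2 | h2
          · refine Or.inl ((PySem.Dict.mem_keys_insert _ _ _ _).2 (Or.inl ?_))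
            cases k; simp_all
          · exact Or.inr ⟨h1, h2, h3⟩

theorem pv_mem_keys_zeroDict (candidates : List String) (k : String × String) :
    k ∈ (pvZeroDict candidates).keys ↔ k.1 ∈ candidates ∧ k.2 ∈ candidates ∧ k.1 ≠ k.2 := by
  unfold pvZeroDict
  suffices h : ∀ (cs : List String) (d : PySem.Dict (String × String) Int),
      k ∈ (cs.foldl (fun d V => candidates.foldl (fun d W => if V ≠ W then d.insert (V, W) 0 else d) d) d).keys
        ↔ k ∈ d.keys ∨ (k.1 ∈ cs ∧ k.2 ∈ candidates ∧ k.1 ≠ k.2) by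
    rw [h candidates PySem.Dict.empty]; simp [PySem.Dict.keys_empty]
  intro cs
  induction cs with
  | nil => simp
  | cons V t ih =>
    intro d
    simp only [List.foldl_cons, ih, pv_mem_keys_zinner]
    constructor
    · rintro ((hd | h) | h)
      · exact Or.inl hd
      · exact Or.inr ⟨by simp [h.1], h.2.1, h.2.2⟩
      · exact Or.inr ⟨by simp [h.1], h.2.1, h.2.2⟩
    · rintro (hd | ⟨h1, h2, h3⟩)
      · exact Or.inl (Or.inl hd)
      · rcases List.mem_cons.1 h1 with h1 | h1
        · exact Or.inl (Or.inr ⟨h1, h2, h3⟩)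
        · exact Or.inr ⟨h1, h2, h3⟩

theorem pv_nodup_keys_zeroDict (candidates : List String) :
    (pvZeroDict candidates).keys.Nodup := by
  unfold pvZeroDict
  have inner : ∀ (cs : List String) (V : String) (d : PySem.Dict (String × String) Int),
      d.keys.Nodup → (cs.foldl (fun d W => if V ≠ W then d.insert (V, W) 0 else d) d).keys.Nodup := by
    intro cs V
    induction cs with
    | nil => exact fun d h => h
    | cons W t ih =>
      intro d h
      simp only [List.foldl_cons]
      by_cases hvw : V ≠ W
      · exact ih _ (by rw [if_pos hvw]; exact PySem.Dict.nodup_keys_insert _ _ _ h)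
      · rw [if_neg hvw]; exact ih _ h
  have outer : ∀ (cs : List String) (d : PySem.Dict (String × String) Int),
      d.keys.Nodup → (cs.foldl (fun d V => candidates.foldl (fun d W => if V ≠ W then d.insert (V, W) 0 else d) d) d).keys.Nodup := by
    intro cs
    induction cs with
    | nil => exact fun d h => h
    | cons V t ih => exact fun d h => ih _ (inner _ _ _ h)
  exact outer candidates PySem.Dict.empty (by simp [PySem.Dict.keys_empty])

theorem pvRow_self (x : String × Int) (k : String × String) : pvRow x x k = 0 := by
  simp [pvRow]

theorem pvRow_of_le (x y : String × Int) (k : String × String) (h : x.2 ≤ y.2) : pvRow x y k = 0 := by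
  simp only [pvRow]
  rw [if_neg (by omega : ¬ x.2 > y.2)]
  simp

theorem pvCnt_append (u v : List (String × Int)) (x : String × Int) (k : String × String) :
    pvCnt (u ++ v) x k = pvCnt u x k + pvCnt v x k := by
  simp [pvCnt]

theorem pvCnt_singleton (x e : String × Int) (k : String × String) :
    pvCnt [e] x k = pvRow x e k := by
  simp [pvCnt]

theorem pvCnt_zero_of_ge (u : List (String × Int)) (e : String × Int) (k : String × String)
    (h : ∀ y ∈ u, e.2 ≤ y.2) : pvCnt u e k = 0 := by
  unfold pvCnt
  rw [List.map_congr_left (fun y hy => pvRow_of_le e y k (h y hy))]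
  simp

theorem pvPairCnt_append_singleton (u : List (String × Int)) (e : String × Int) (k : String × String)
    (h : ∀ y ∈ u, y.2 ≤ e.2) :
    pvPairCnt (u ++ [e]) k = pvPairCnt u k + pvCnt u e k := by
  simp only [pvPairCnt, List.map_append, List.sum_append, List.map_cons, List.map_nil,
    List.sum_cons, List.sum_nil]
  have h1 : ∀ x ∈ u, pvCnt (u ++ [e]) x k = pvCnt u x k := by
    intro x hx
    rw [pvCnt_append, pvCnt_singleton, pvRow_of_le x e k (h x hx)]; ring
  rw [List.map_congr_left h1, pvCnt_append, pvCnt_singleton, pvRow_self]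
  ring

-- on a rank-monotone list, the double-loop count splits into prefix count + sweep additions
theorem pvPairCnt_eq_add_pairsAdd (rest : List (String × Int)) :
    ∀ (u : List (String × Int)) (k : String × String),
    (u ++ rest).Pairwise (fun a b => a.2 ≤ b.2) →
    pvPairCnt (u ++ rest) k = pvPairCnt u k + pvPairsAdd u rest k := by
  induction rest with
  | nil => intro u k _; simp [pvPairsAdd]
  | cons e t ih =>
    intro u k hpw
    have hassoc : u ++ e :: t = (u ++ [e]) ++ t := by simp
    rw [hassoc, ih (u ++ [e]) k (by rw [← hassoc]; exact hpw), pvPairsAdd,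
      pvPairCnt_append_singleton u e k ?hle]
    · ring
    case hle =>
      intro y hy
      exact (List.pairwise_append.1 hpw).2.2 y hy e (by simp)

theorem pvCnt_perm {u u' : List (String × Int)} (hp : u.Perm u') (x : String × Int) (k : String × String) :
    pvCnt u x k = pvCnt u' x k :=
  List.Perm.sum_eq (hp.map _)

theorem pvPairCnt_perm {l l' : List (String × Int)} (hp : l.Perm l') (k : String × String) :
    pvPairCnt l k = pvPairCnt l' k := by
  unfold pvPairCnt
  have h1 : (fun x => pvCnt l x k) = (fun x => pvCnt l' x k) := funext fun x => pvCnt_perm hp x k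
  rw [h1]
  exact List.Perm.sum_eq (hp.map _)

-- A's inner loop over one x
theorem pvA_inner_getD (entries : List (String × Int)) (x : String × Int)
    (d : PySem.Dict (String × String) Int) (k : String × String) :
    (entries.foldl (fun d y =>
        if x.1 ≠ y.1 then d.modify (x.1, y.1) 0 (· + (if x.2 > y.2 then 1 else 0)) else d) d).getD k 0
      = d.getD k 0 + pvCnt entries x k := by
  have := pv_getD_foldl_cmod entries (fun y => (x.1, y.1)) (fun y => x.1 ≠ y.1)
    (fun y => if x.2 > y.2 then 1 else 0) d k
  rw [this]
  rfl

theorem pvA_inner_keys (entries : List (String × Int)) (x : String × Int)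
    (d : PySem.Dict (String × String) Int)
    (h : ∀ y ∈ entries, x.1 ≠ y.1 → (x.1, y.1) ∈ d.keys) :
    (entries.foldl (fun d y =>
        if x.1 ≠ y.1 then d.modify (x.1, y.1) 0 (· + (if x.2 > y.2 then 1 else 0)) else d) d).keys = d.keys :=
  pv_keys_foldl_cmod entries (fun y => (x.1, y.1)) (fun y => x.1 ≠ y.1)
    (fun y => if x.2 > y.2 then 1 else 0) d h

theorem pvA_ballot_aux (entries : List (String × Int)) (l : List (String × Int)) :
    ∀ (d : PySem.Dict (String × String) Int),
    (∀ x ∈ l, ∀ y ∈ entries, x.1 ≠ y.1 → (x.1, y.1) ∈ d.keys) →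
    ((l.foldl (fun d x =>
      entries.foldl (fun d y =>
        if x.1 ≠ y.1 then d.modify (x.1, y.1) 0 (· + (if x.2 > y.2 then 1 else 0)) else d) d)
      d).keys = d.keys ∧
    ∀ k, (l.foldl (fun d x =>
      entries.foldl (fun d y =>
        if x.1 ≠ y.1 then d.modify (x.1, y.1) 0 (· + (if x.2 > y.2 then 1 else 0)) else d) d)
      d).getD k 0 = d.getD k 0 + (l.map (fun x => pvCnt entries x k)).sum) := by
  induction l with
  | nil => intro d _; simp
  | cons x t ih =>
    intro d h
    simp only [List.foldl_cons]
    have hk := pvA_inner_keys entries x d (h x (by simp))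
    have h' : ∀ a ∈ t, ∀ y ∈ entries, a.1 ≠ y.1 → (a.1, y.1) ∈
        (entries.foldl (fun d y =>
          if x.1 ≠ y.1 then d.modify (x.1, y.1) 0 (· + (if x.2 > y.2 then 1 else 0)) else d) d).keys := by
      intro a ha y hy hne
      rw [hk]; exact h a (by simp [ha]) y hy hne
    obtain ⟨ihk, ihg⟩ := ih _ h'
    refine ⟨by rw [ihk, hk], fun k => ?_⟩
    rw [ihg k, pvA_inner_getD]
    simp only [List.map_cons, List.sum_cons]
    ring

-- A's per-ballot double loop
theorem pvA_ballot (entries : List (String × Int)) (d : PySem.Dict (String × String) Int)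
    (h : ∀ x ∈ entries, ∀ y ∈ entries, x.1 ≠ y.1 → (x.1, y.1) ∈ d.keys) :
    (entries.foldl (fun d x =>
      entries.foldl (fun d y =>
        if x.1 ≠ y.1 then d.modify (x.1, y.1) 0 (· + (if x.2 > y.2 then 1 else 0)) else d) d)
      d).keys = d.keys ∧
    ∀ k, (entries.foldl (fun d x =>
      entries.foldl (fun d y =>
        if x.1 ≠ y.1 then d.modify (x.1, y.1) 0 (· + (if x.2 > y.2 then 1 else 0)) else d) d)
      d).getD k 0 = d.getD k 0 + pvPairCnt entries k :=
  pvA_ballot_aux entries entries d h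

-- B's seen-loop over the names below e's rank adds exactly pvCnt u e k
theorem pvSeen_getD (u : List (String × Int)) (e : String × Int)
    (d : PySem.Dict (String × String) Int) (k : String × String)
    (h : ∀ y ∈ u, y.2 < e.2) :
    ((u.map (·.1)).foldl (fun d W => if e.1 ≠ W then d.modify (e.1, W) 0 (· + 1) else d) d).getD k 0
      = d.getD k 0 + pvCnt u e k := by
  rw [pv_getD_foldl_cmod (u.map (·.1)) (fun W => (e.1, W)) (fun W => e.1 ≠ W) (fun _ => 1) d k]
  congr 1
  rw [List.map_map]
  unfold pvCnt
  apply congrArg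
  apply List.map_congr_left
  intro y hy
  simp only [Function.comp, pvRow]
  by_cases h1 : e.1 ≠ y.1 ∧ (e.1, y.1) = k
  · rw [if_pos h1, if_pos h1, if_pos (by exact h y hy)]
  · rw [if_neg h1, if_neg h1]

theorem pvSeen_keys (u : List String) (e : String × Int)
    (d : PySem.Dict (String × String) Int)
    (h : ∀ W ∈ u, e.1 ≠ W → (e.1, W) ∈ d.keys) :
    (u.foldl (fun d W => if e.1 ≠ W then d.modify (e.1, W) 0 (· + 1) else d) d).keys = d.keys :=
  pv_keys_foldl_cmod u (fun W => (e.1, W)) (fun W => e.1 ≠ W) (fun _ => 1) d h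

-- the sweep kernel: invariant over the rank-sorted remainder
theorem pvB_sweep (rest : List (String × Int)) :
    ∀ (p g : List (String × Int)) (r : Int) (d : PySem.Dict (String × String) Int),
    (∀ x ∈ p ++ g ++ rest, ∀ y ∈ p ++ g ++ rest, x.1 ≠ y.1 → (x.1, y.1) ∈ d.keys) →
    (p ++ g ++ rest).Pairwise (fun a b => a.2 ≤ b.2) →
    g ≠ [] → (∀ y ∈ g, y.2 = r) → (∀ y ∈ p, y.2 < r) →
    ((rest.foldl pvStep (d, p.map (·.1), g.map (·.1), some r)).1.keys = d.keys ∧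
    ∀ k, (rest.foldl pvStep (d, p.map (·.1), g.map (·.1), some r)).1.getD k 0
      = d.getD k 0 + pvPairsAdd (p ++ g) rest k) := by
  induction rest with
  | nil => intro p g r d _ _ _ _ _; exact ⟨rfl, fun k => by simp [pvPairsAdd]⟩
  | cons e t ih =>
    intro p g r d hmem hpw hg hgr hpr
    have hgf : g.map (·.1) ≠ [] := by
      cases g with
      | nil => exact absurd rfl hg
      | cons a b => simp
    have hre : r ≤ e.2 := by
      cases g with
      | nil => exact absurd rfl hg
      | cons a b =>
        have := (List.pairwise_append.1 hpw).2.2 a (List.mem_append.2 (Or.inr (by simp))) e (by simp)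
        rw [hgr a (by simp)] at this; exact this
    have hpe : ∀ y ∈ p, y.2 < e.2 := fun y hy => lt_of_lt_of_le (hpr y hy) hre
    have hmem' : ∀ (u : List (String × Int)), (∀ z ∈ u, z ∈ p ++ g) →
        ∀ W ∈ u.map (·.1), e.1 ≠ W → (e.1, W) ∈ d.keys := by
      intro u hu W hW hne
      obtain ⟨y, hy, hyW⟩ := List.mem_map.1 hW
      subst hyW
      exact hmem e (by simp) y (by have := hu y hy; simp at this ⊢; tauto) hne
    by_cases he : e.2 = r
    · -- same rank tier: no flush, g's names are tied with e and add nothing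
      have hcond : ¬ (g.map (·.1) ≠ [] ∧ some e.2 ≠ some r) := by simp [he]
      have hstep : pvStep (d, p.map (·.1), g.map (·.1), some r) e
          = ((p.map (·.1)).foldl (fun d W => if e.1 ≠ W then d.modify (e.1, W) 0 (· + 1) else d) d,
             p.map (·.1), (g ++ [e]).map (·.1), some r) := by
        unfold pvStep
        rw [if_neg hcond]
        simp [he]
      set d' := (p.map (·.1)).foldl (fun d W => if e.1 ≠ W then d.modify (e.1, W) 0 (· + 1) else d) d with hd'
      have hkeys' : d'.keys = d.keys :=
        pvSeen_keys _ e d (hmem' p (by intro z hz; simp [hz]))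
      have hgetD' : ∀ k, d'.getD k 0 = d.getD k 0 + pvCnt p e k := fun k =>
        pvSeen_getD p e d k (fun y hy => by rw [he]; exact hpr y hy)
      have hlist : p ++ (g ++ [e]) ++ t = p ++ g ++ (e :: t) := by simp
      have ihres := ih p (g ++ [e]) r d'
        (by rw [hlist]; intro x hx y hy hne; rw [hkeys']; exact hmem x hx y hy hne)
        (by rw [hlist]; exact hpw)
        (by simp)
        (by intro y hy; rcases List.mem_append.1 hy with h | h
            · exact hgr y h
            · simp at h; rw [h, he])
        hpr
      rw [List.foldl_cons, hstep]
      refine ⟨by rw [ihres.1, hkeys'], fun k => ?_⟩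
      rw [ihres.2 k, hgetD' k]
      have hcg : pvCnt (p ++ g) e k = pvCnt p e k := by
        rw [pvCnt_append, pvCnt_zero_of_ge g e k (fun y hy => by rw [hgr y hy, he])]
        ring
      show _ = d.getD k 0 + pvPairsAdd (p ++ g) (e :: t) k
      rw [pvPairsAdd, hcg]
      have : p ++ g ++ [e] = p ++ (g ++ [e]) := by simp
      rw [this]
      ring
    · -- strictly larger rank: flush the tier, then all of p ++ g lies strictly below e
      have hrlt : r < e.2 := lt_of_le_of_ne hre (fun h => he h.symm)
      have hcond : (g.map (·.1) ≠ [] ∧ some e.2 ≠ some r) := ⟨hgf, by simp [he]⟩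
      have hstep : pvStep (d, p.map (·.1), g.map (·.1), some r) e
          = (((p ++ g).map (·.1)).foldl (fun d W => if e.1 ≠ W then d.modify (e.1, W) 0 (· + 1) else d) d,
             (p ++ g).map (·.1), [e].map (·.1), some e.2) := by
        unfold pvStep
        rw [if_pos hcond]
        simp
      set d' := ((p ++ g).map (·.1)).foldl (fun d W => if e.1 ≠ W then d.modify (e.1, W) 0 (· + 1) else d) d with hd'
      have hpge : ∀ y ∈ p ++ g, y.2 < e.2 := by
        intro y hy; rcases List.mem_append.1 hy with h | h
        · exact hpe y h
        · rw [hgr y h]; exact hrlt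
      have hkeys' : d'.keys = d.keys :=
        pvSeen_keys _ e d (hmem' (p ++ g) (fun z hz => hz))
      have hgetD' : ∀ k, d'.getD k 0 = d.getD k 0 + pvCnt (p ++ g) e k := fun k =>
        pvSeen_getD (p ++ g) e d k hpge
      have hlist : (p ++ g) ++ [e] ++ t = p ++ g ++ (e :: t) := by simp
      have ihres := ih (p ++ g) [e] e.2 d'
        (by rw [hlist]; intro x hx y hy hne; rw [hkeys']; exact hmem x hx y hy hne)
        (by rw [hlist]; exact hpw)
        (by simp)
        (by intro y hy; simp at hy; rw [hy])
        hpge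
      rw [List.foldl_cons, hstep]
      refine ⟨by rw [ihres.1, hkeys'], fun k => ?_⟩
      rw [ihres.2 k, hgetD' k]
      show _ = d.getD k 0 + pvPairsAdd (p ++ g) (e :: t) k
      rw [pvPairsAdd]
      ring

-- B's whole per-ballot sweep computes A's per-ballot pair count
theorem pvB_ballot (entries : List (String × Int)) (d : PySem.Dict (String × String) Int)
    (h : ∀ x ∈ entries, ∀ y ∈ entries, x.1 ≠ y.1 → (x.1, y.1) ∈ d.keys) :
    (((PySem.List.sorted entries (fun e => e.2) false).foldl pvStep (d, [], [], none)).1.keys = d.keys ∧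
    ∀ k, ((PySem.List.sorted entries (fun e => e.2) false).foldl pvStep (d, [], [], none)).1.getD k 0
      = d.getD k 0 + pvPairCnt entries k) := by
  have hperm := PySem.List.sorted_perm entries (fun e => e.2) false
  have hpw := PySem.List.sorted_pairwise entries (fun e => e.2)
  cases hs : PySem.List.sorted entries (fun e => e.2) false with
  | nil =>
    have : entries = [] := (PySem.List.sorted_eq_nil_iff _ _ _).1 hs
    subst this
    exact ⟨rfl, fun k => by simp [pvPairCnt, pvCnt]⟩
  | cons e t =>
    rw [hs] at hperm hpw
    have hmem : ∀ z ∈ e :: t, z ∈ entries := fun z hz => hperm.mem_iff.1 hz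
    have hstep1 : pvStep (d, [], [], none) e = (d, [], [e.1], some e.2) := by
      unfold pvStep; simp
    have hfold : (e :: t).foldl pvStep (d, ([] : List String), ([] : List String), (none : Option Int))
        = t.foldl pvStep (d, [], [e.1], some e.2) := by
      rw [List.foldl_cons, hstep1]
    have hsw := pvB_sweep t [] [e] e.2 d
      (by intro x hx y hy hne
          simp only [List.nil_append] at hx hy
          exact h x (hmem x (by simpa using hx)) y (hmem y (by simpa using hy)) hne)
      (by simpa using hpw)
      (by simp)
      (by intro y hy; simp at hy; rw [hy])
      (by intro y hy; simp at hy)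
    simp only [List.map_nil, List.map_cons] at hsw
    refine ⟨by rw [hfold]; exact hsw.1, fun k => ?_⟩
    rw [hfold, hsw.2 k]
    have hcnt : pvPairCnt entries k = pvPairsAdd [e] t k := by
      rw [pvPairCnt_perm hperm.symm k]
      have := pvPairCnt_eq_add_pairsAdd t [e] k (by simpa using hpw)
      simp only [List.singleton_append] at this
      rw [this]
      simp [pvPairCnt, pvCnt, pvRow]
    rw [hcnt]
    rfl

-- every value of ofList comes from the association list
theorem pv_values_ofList_sub {κ ν : Type} [BEq κ] [LawfulBEq κ] (l : List (κ × ν)) (v : ν)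
    (h : v ∈ (PySem.Dict.ofList l).values) : ∃ k, (k, v) ∈ l := by
  have main : ∀ (l : List (κ × ν)) (d : PySem.Dict κ ν), v ∈ (l.foldl (fun d p => d.insert p.1 p.2) d).values →
      v ∈ d.values ∨ ∃ k, (k, v) ∈ l := by
    intro l
    induction l with
    | nil => exact fun d h => Or.inl h
    | cons p t ih =>
      intro d hv
      rcases ih _ hv with hv' | ⟨k, hk⟩
      · rcases PySem.Dict.mem_values_insert _ _ _ _ hv' with h1 | h1
        · exact Or.inr ⟨p.1, by subst h1; simp⟩
        · exact Or.inl h1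
      · exact Or.inr ⟨k, by simp [hk]⟩
  rcases main l PySem.Dict.empty h with h1 | h1
  · exact absurd h1 (by simp [show (PySem.Dict.empty : PySem.Dict κ ν).values = [] from rfl])
  · exact h1

-- a fold of keys-preserving, getD-additive per-ballot steps
theorem pv_top (vals : List (List (String × Int)))
    (F : PySem.Dict (String × String) Int → List (String × Int) → PySem.Dict (String × String) Int)
    (hF : ∀ (d : PySem.Dict (String × String) Int) (es : List (String × Int)),
      es ∈ vals → (∀ x ∈ es, ∀ y ∈ es, x.1 ≠ y.1 → (x.1, y.1) ∈ d.keys) →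
      (F d es).keys = d.keys ∧ ∀ k, (F d es).getD k 0 = d.getD k 0 + pvPairCnt es k) :
    ∀ (d : PySem.Dict (String × String) Int),
    (∀ es ∈ vals, ∀ x ∈ es, ∀ y ∈ es, x.1 ≠ y.1 → (x.1, y.1) ∈ d.keys) →
    ((vals.foldl F d).keys = d.keys ∧
     ∀ k, (vals.foldl F d).getD k 0 = d.getD k 0 + (vals.map (fun es => pvPairCnt es k)).sum) := by
  induction vals with
  | nil => exact fun d _ => ⟨rfl, fun k => by simp⟩
  | cons es t ih =>
    intro d h
    have h1 := hF d es (by simp) (h es (by simp))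
    have h2 := ih (fun d es hes hin => hF d es (by simp [hes]) hin) (F d es)
      (by intro es' hes' x hx y hy hne; rw [h1.1]; exact h es' (by simp [hes']) x hx y hy hne)
    refine ⟨by rw [List.foldl_cons, h2.1, h1.1], fun k => ?_⟩
    rw [List.foldl_cons, h2.2 k, h1.2 k]
    simp only [List.map_cons, List.sum_cons]
    ring

theorem schulze_d_equal (candidates : List String) (ballots : List (String × List (String × Int)))
    (hpre : Pre_schulze_d candidates ballots) :
    schulze_d candidates ballots = schulze_d_alt candidates ballots := by
  unfold schulze_d schulze_d_alt
  simp only []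
  set bd := PySem.Dict.ofList ballots with hbd
  set z := pvZeroDict candidates with hz
  have hnd : bd.keys.Nodup := PySem.Dict.nodup_keys_ofList ballots
  -- A iterates ballots.keys() and indexes: that is a fold over ballots.values()
  have hAkeys : bd.keys.foldl (fun d voter =>
      (bd.getD voter []).foldl (fun d x =>
        (bd.getD voter []).foldl (fun d y =>
          if x.1 ≠ y.1 then d.modify (x.1, y.1) 0 (· + (if x.2 > y.2 then 1 else 0)) else d) d) d) z
    = bd.values.foldl (fun d es =>
        es.foldl (fun d x =>
          es.foldl (fun d y =>
            if x.1 ≠ y.1 then d.modify (x.1, y.1) 0 (· + (if x.2 > y.2 then 1 else 0)) else d) d) d) z := by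
    rw [PySem.Dict.values_eq_map_keys bd hnd ([] : List (String × Int)), List.foldl_map]
  rw [hAkeys]
  have hval : ∀ es ∈ bd.values, ∀ x ∈ es, ∀ y ∈ es, x.1 ≠ y.1 → (x.1, y.1) ∈ z.keys := by
    intro es hes x hx y hy hne
    obtain ⟨key, hkey⟩ := pv_values_ofList_sub ballots es hes
    have := hpre (key, es) hkey x hx y hy hne
    rw [pv_mem_keys_zeroDict]
    exact ⟨this.1, this.2, hne⟩
  have hA := pv_top bd.values _ (fun d es _ hin => pvA_ballot es d hin) z hval
  have hBstep : (fun (st : PySem.Dict (String × String) Int × List String × List String × Option Int) (e : String × Int) =>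
        let fl := if st.2.2.1 ≠ [] ∧ some e.2 ≠ st.2.2.2
                  then (st.2.1 ++ st.2.2.1, ([] : List String))
                  else (st.2.1, st.2.2.1)
        let d' := fl.1.foldl (fun d W => if e.1 ≠ W then d.modify (e.1, W) 0 (· + 1) else d) st.1
        (d', fl.1, fl.2 ++ [e.1], some e.2)) = pvStep := rfl
  rw [hBstep]
  have hB := pv_top bd.values _ (fun d es _ hin => pvB_ballot es d hin) z hval
  have hieq : (bd.values.foldl (fun d es =>
      es.foldl (fun d x =>
        es.foldl (fun d y =>
          if x.1 ≠ y.1 then d.modify (x.1, y.1) 0 (· + (if x.2 > y.2 then 1 else 0)) else d) d) d) z).items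
      = (bd.values.foldl (fun d es =>
          ((PySem.List.sorted es (fun e => e.2) false).foldl pvStep (d, [], [], none)).1) z).items := by
    rw [PySem.Dict.items_eq_map_keys _ (by rw [hA.1]; exact pv_nodup_keys_zeroDict candidates) 0,
        PySem.Dict.items_eq_map_keys _ (by rw [hB.1]; exact pv_nodup_keys_zeroDict candidates) 0,
        hA.1, hB.1]
    apply List.map_congr_left
    intro k _
    rw [hA.2 k, hB.2 k]
  rw [hieq]

-- ===== VERDICT (by name: the statement is the Claim_ definition above) =====
theorem schulze_d_spec : Claim_equal_schulze_d := by
  intro candidates ballots _ hpre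
  unfold Spec_schulze_d
  exact schulze_d_equal candidates ballots hpre

@[simp] theorem schulze_d_raises : Claim_raises_schulze_d := by
  unfold Claim_raises_schulze_d
  refine ⟨?_, by decide⟩
  rintro c b _ ⟨⟨p, hp, x, hx, y, hy, hne, hbad⟩, -⟩ hpre
  rcases hbad with hb | hb
  · exact hb (hpre p hp x hx y hy hne).1
  · exact hb (hpre p hp x hx y hy hne).2
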